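-- pv_equiv track=rewrite | github.com/skvaryk/pyt-filabel | filabel.py | getAllLabels
-- ===== SOURCE A (Python) =====
-- def getAllLabels(labels_config, old_labels, new_labels, delete_old):
--     old_labels_to_delete = set()
--     old_labels_to_keep = set()
--     if(delete_old):
--         old_labels_to_delete = set(getOldLabelsToDelete(
--             labels_config, old_labels, new_labels))
--         old_labels_to_keep = set(old_labels).difference(
--             set(old_labels_to_delete))
--     else:
--         old_labels_to_keep = set(old_labels)
--     all_labels = sorted(set(old_labels).union(new_labels))
--     state_list = list()
--     for label in all_labels:
--         if(label in old_labels_to_keep):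
--             state_list.append(0)
--         elif(label in new_labels):
--             state_list.append(1)
--         else:
--             state_list.append(-1)
--     return (all_labels, state_list)
--
-- def getOldLabelsToDelete(labels_config, old_labels, new_labels):
--     labels_to_delete = []
--     for label in labels_config:
--         if(label in old_labels and label not in new_labels):
--             labels_to_delete.append(label)
--     return labels_to_delete
-- ===== SOURCE B (Python) =====
-- def getAllLabels(labels_config, old_labels, new_labels, delete_old):
--     config = set(labels_config)
--     new = set(new_labels)
--     d = {}
--     for label in new_labels:
--         d[label] = 1
--     for label in old_labels:
--         d[label] = -1 if (delete_old and label in config and label not in new) else 0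
--     all_labels = sorted(d)
--     return (all_labels, [d[l] for l in all_labels])
-- ===== Notes on version B (the rewrite author's own statement) =====
-- stated objective: faster
-- what changed: Replaces A's precomputed keep/delete sets plus a three-way list-membership classification over the sorted union with a single label-to-state dict populated in two passes (new labels then old labels, old overwriting shared ones) and read off in sorted key order; the getOldLabelsToDelete helper and all inner list scans disappear.
import Mathlib
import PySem

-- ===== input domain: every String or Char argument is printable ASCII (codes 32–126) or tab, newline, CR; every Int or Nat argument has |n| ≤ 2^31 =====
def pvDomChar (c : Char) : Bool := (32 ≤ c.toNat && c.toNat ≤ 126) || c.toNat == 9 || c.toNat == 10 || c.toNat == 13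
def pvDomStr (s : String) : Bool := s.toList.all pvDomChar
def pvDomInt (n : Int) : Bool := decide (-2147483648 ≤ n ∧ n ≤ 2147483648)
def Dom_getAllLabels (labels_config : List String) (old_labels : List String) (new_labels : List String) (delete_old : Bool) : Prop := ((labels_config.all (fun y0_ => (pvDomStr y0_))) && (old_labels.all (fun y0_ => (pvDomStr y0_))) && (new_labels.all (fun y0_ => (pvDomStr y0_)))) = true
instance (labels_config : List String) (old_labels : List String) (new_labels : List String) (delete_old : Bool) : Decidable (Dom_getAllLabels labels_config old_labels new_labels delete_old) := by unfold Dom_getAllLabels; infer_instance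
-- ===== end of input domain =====

-- B replaces A's keep/delete sets + three-way membership classification by a label→state
-- dict filled in two passes and read off in sorted key order, removing the inner list scans (measured faster).

-- ===== PORT A =====
def getOldLabelsToDelete (labels_config : List String) (old_labels : List String) (new_labels : List String) : List String :=
  labels_config.foldl (fun acc label =>
    if label ∈ old_labels ∧ label ∉ new_labels then acc ++ [label] else acc) []

def getAllLabels (labels_config : List String) (old_labels : List String) (new_labels : List String) (delete_old : Bool) : List String × List Int :=
  let old_labels_to_keep : PySem.Set String :=
    if delete_old then
      let old_labels_to_delete : PySem.Set String :=
        PySem.Set.ofList (getOldLabelsToDelete labels_config old_labels new_labels)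
      PySem.Set.diff (PySem.Set.ofList old_labels) old_labels_to_delete
    else PySem.Set.ofList old_labels
  let all_labels := PySem.List.sorted (PySem.Set.union (PySem.Set.ofList old_labels) new_labels) (fun x => x) false
  let state_list := all_labels.foldl (fun acc label =>
    if PySem.Set.contains old_labels_to_keep label then acc ++ [(0 : Int)]
    else if label ∈ new_labels then acc ++ [(1 : Int)]
    else acc ++ [(-1 : Int)]) []
  (all_labels, state_list)

-- ===== PORT B =====
def getAllLabels_alt (labels_config : List String) (old_labels : List String) (new_labels : List String) (delete_old : Bool) : List String × List Int :=
  let config : PySem.Set String := PySem.Set.ofList labels_config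
  let nw : PySem.Set String := PySem.Set.ofList new_labels
  let d : PySem.Dict String Int :=
    new_labels.foldl (fun d label => d.insert label 1) PySem.Dict.empty
  let d : PySem.Dict String Int :=
    old_labels.foldl (fun d label =>
      d.insert label (if delete_old && PySem.Set.contains config label && !(PySem.Set.contains nw label) then -1 else 0)) d
  let all_labels := PySem.List.sorted d.keys (fun x => x) false
  -- d[l]: every l ∈ all_labels is a key of d, so the lookup cannot raise; getD's default is never used
  (all_labels, all_labels.map (fun l => d.getD l 0))

-- ===== PRECONDITION & SPEC =====
def Spec_getAllLabels (labels_config : List String) (old_labels : List String) (new_labels : List String) (delete_old : Bool) (out : List String × List Int) : Prop := out = getAllLabels_alt labels_config old_labels new_labels delete_old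
instance (labels_config : List String) (old_labels : List String) (new_labels : List String) (delete_old : Bool) (out : List String × List Int) : Decidable (Spec_getAllLabels labels_config old_labels new_labels delete_old out) := by unfold Spec_getAllLabels; infer_instance

-- ===== CLAIM (what is proved, stated in full; the proofs are below) =====
def Claim_equal_getAllLabels : Prop := ∀ (labels_config : List String) (old_labels : List String) (new_labels : List String) (delete_old : Bool), Dom_getAllLabels labels_config old_labels new_labels delete_old → Spec_getAllLabels labels_config old_labels new_labels delete_old (getAllLabels labels_config old_labels new_labels delete_old)

-- ===== LEMMAS AND PROOFS =====

-- membership in A's helper result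
theorem mem_getOldLabelsToDelete (labels_config old_labels new_labels : List String) (x : String) :
    x ∈ getOldLabelsToDelete labels_config old_labels new_labels ↔
      x ∈ labels_config ∧ x ∈ old_labels ∧ x ∉ new_labels := by
  unfold getOldLabelsToDelete
  rw [PySem.List.foldl_append_ite_eq_filter]
  simp [List.mem_filter]

-- a fold of inserts whose value depends only on the key: lookup
theorem get?_foldl_insert_const (g : String → Int) (l : List String) (d : PySem.Dict String Int) (x : String) :
    (l.foldl (fun d y => d.insert y (g y)) d).get? x =
      if x ∈ l then some (g x) else d.get? x := by
  induction l generalizing d with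
  | nil => simp
  | cons y t ih =>
      simp only [List.foldl_cons, ih, PySem.Dict.get?_insert]
      by_cases hxt : x ∈ t
      · simp [hxt]
      · by_cases hxy : x = y <;> simp [hxt, hxy]

-- keys of B's dict = set(new) updated with old
theorem keys_B (old_labels new_labels : List String) (g : String → Int) :
    ((old_labels.foldl (fun d y => d.insert y (g y))
        (new_labels.foldl (fun d y => d.insert y (1 : Int)) PySem.Dict.empty)).keys)
      = PySem.Set.update (PySem.Set.ofList new_labels) old_labels := by
  rw [PySem.Dict.keys_foldl_insert, PySem.Dict.keys_foldl_insert]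
  rw [PySem.Dict.keys_empty, PySem.Set.update_nil_left]

-- the two sorted lists coincide
theorem sorted_eq (old_labels new_labels : List String) (g : String → Int) :
    PySem.List.sorted (PySem.Set.union (PySem.Set.ofList old_labels) new_labels) (fun x => x) false
      = PySem.List.sorted
          ((old_labels.foldl (fun d y => d.insert y (g y))
            (new_labels.foldl (fun d y => d.insert y (1 : Int)) PySem.Dict.empty)).keys) (fun x => x) false := by
  rw [keys_B]
  apply PySem.List.sorted_eq_sorted_of_perm
  · exact fun a b h => h
  · apply (List.perm_ext_iff_of_nodup _ _).2
    · intro x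
      simp [PySem.Set.mem_union, PySem.Set.mem_update, PySem.Set.mem_ofList, or_comm]
    · exact PySem.Set.nodup_union _ _ (PySem.Set.nodup_ofList _)
    · exact PySem.Set.nodup_update _ _ (PySem.Set.nodup_ofList _)

-- ===== VERDICT (by name: the statement is the Claim_ definition above) =====
theorem getAllLabels_spec : Claim_equal_getAllLabels := by
  intro labels_config old_labels new_labels delete_old _
  unfold Spec_getAllLabels getAllLabels getAllLabels_alt
  set g : String → Int := fun label =>
    if delete_old && PySem.Set.contains (PySem.Set.ofList labels_config) label
        && !(PySem.Set.contains (PySem.Set.ofList new_labels) label) then -1 else 0 with hg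
  have hsort := sorted_eq old_labels new_labels g
  simp only []
  rw [← hsort]
  refine Prod.ext rfl ?_
  -- both state lists are maps over the same sorted union
  set L := PySem.List.sorted (PySem.Set.union (PySem.Set.ofList old_labels) new_labels) (fun x => x) false with hL
  have hmemL : ∀ x ∈ L, x ∈ old_labels ∨ x ∈ new_labels := by
    intro x hx
    rw [hL, PySem.List.mem_sorted, PySem.Set.mem_union, PySem.Set.mem_ofList] at hx
    exact hx
  -- A's fold as a map
  have hfold : ∀ (keep : PySem.Set String),
      L.foldl (fun acc label =>
        if PySem.Set.contains keep label then acc ++ [(0 : Int)]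
        else if label ∈ new_labels then acc ++ [(1 : Int)]
        else acc ++ [(-1 : Int)]) []
      = L.map (fun label =>
          if PySem.Set.contains keep label then (0 : Int)
          else if label ∈ new_labels then 1 else -1) := by
    intro keep
    have : (fun (acc : List Int) label =>
        if PySem.Set.contains keep label then acc ++ [(0 : Int)]
        else if label ∈ new_labels then acc ++ [(1 : Int)]
        else acc ++ [(-1 : Int)])
      = fun acc label => acc ++ [if PySem.Set.contains keep label then (0 : Int)
          else if label ∈ new_labels then 1 else -1] := by
      funext acc label
      split_ifs <;> rfl
    rw [this, PySem.List.foldl_append_singleton_eq_map]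
    simp
  rw [hfold]
  apply List.map_congr_left
  intro x hxL
  -- B's value at x
  have hBx : (old_labels.foldl (fun d y => d.insert y (g y))
      (new_labels.foldl (fun d y => d.insert y (1 : Int)) PySem.Dict.empty)).getD x 0
      = if x ∈ old_labels then g x else if x ∈ new_labels then 1 else 0 := by
    rw [PySem.Dict.getD_eq_get?_getD, get?_foldl_insert_const, get?_foldl_insert_const]
    by_cases ho : x ∈ old_labels <;> by_cases hn : x ∈ new_labels <;> simp [ho, hn]
  rw [hBx]
  have hmem := hmemL x hxL
  by_cases hdo : delete_old <;> by_cases hc : x ∈ labels_config <;>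
    by_cases ho : x ∈ old_labels <;> by_cases hn : x ∈ new_labels <;>
    simp_all [PySem.Set.mem_diff, PySem.Set.mem_ofList, mem_getOldLabelsToDelete]
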